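-- pv_equiv track=rewrite | github.com/harvard-edge/cs249r_book | book/tools/scripts/utilities/convert_grid_to_pipe_tables.py | parse_grid_table
-- ===== SOURCE A (Python) =====
-- def parse_alignment(separator_line: str) -> list[str]:
--     """
--     Parse alignment from grid table separator line.
--
--     Example: +:==============+:=================+============:+
--     Returns: [':--', ':--', '--:', ...]
--     """
--     alignments = []
--     # Split by + and remove empty strings at start/end
--     parts = [p for p in separator_line.split('+') if p]
--
--     for part in parts:
--         part = part.strip()
--         if not part:
--             continue
--
--         starts_colon = part.startswith(':')
--         ends_colon = part.endswith(':')
--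
--         if starts_colon and ends_colon:
--             alignments.append(':---:')  # center
--         elif ends_colon:
--             alignments.append('---:')   # right
--         elif starts_colon:
--             alignments.append(':---')   # left
--         else:
--             alignments.append('---')    # default
--
--     return alignments
--
-- def parse_grid_table(table_lines: list[str]) -> tuple[list[str], list[list[str]], list[str]]:
--     """
--     Parse a grid table into headers, rows, and alignments.
--
--     Returns: (headers, data_rows, alignments)
--     """
--     headers = []
--     rows = []
--     alignments = []
--
--     in_header = True
--
--     for line in table_lines:
--         line = line.rstrip()
--
--         # Header separator (with =) - extract alignment
--         if '=' in line and line.startswith('+'):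
--             alignments = parse_alignment(line)
--             in_header = False
--             continue
--
--         # Row separator (just -)
--         if line.startswith('+') and '-' in line:
--             continue
--
--         # Data line
--         if line.startswith('|'):
--             # Split by | and clean up cells
--             cells = [c.strip() for c in line.split('|')]
--             # Remove empty first/last from split
--             cells = [c for c in cells if c or cells.index(c) not in (0, len(cells)-1)]
--             # Actually just use a cleaner approach
--             cells = line.strip('|').split('|')
--             cells = [c.strip() for c in cells]
--
--             if in_header:
--                 headers = cells
--             else:
--                 rows.append(cells)
--
--     # Default alignments if none found
--     if not alignments and headers:
--         alignments = ['---'] * len(headers)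
--
--     return headers, rows, alignments
-- ===== SOURCE B (Python) =====
-- _ALIGN = {(True, True): ':---:', (False, True): '---:', (True, False): ':---', (False, False): '---'}
--
--
-- def _is_sep(line):
--     return line.startswith('+') and '=' in line
--
--
-- def _alignments_of(separator_line):
--     out = []
--     for part in separator_line.split('+'):
--         p = part.strip()
--         if p:
--             out.append(_ALIGN[(p.startswith(':'), p.endswith(':'))])
--     return out
--
--
-- def _cells(line):
--     return [c.strip() for c in line.strip('|').split('|')]
--
--
-- def parse_grid_table(table_lines):
--     clean = [ln.rstrip() for ln in table_lines]
--     # split at the FIRST header separator: head_zone before it, tail after it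
--     it = iter(clean)
--     head_zone = []
--     for ln in it:
--         if _is_sep(ln):
--             break
--         head_zone.append(ln)
--     tail = list(it)
--     seps = [ln for ln in clean if _is_sep(ln)]
--     alignments = _alignments_of(seps[-1]) if seps else []
--     header_lines = [ln for ln in head_zone if ln.startswith('|')]
--     headers = _cells(header_lines[-1]) if header_lines else []
--     rows = [_cells(ln) for ln in tail if ln.startswith('|')]
--     if not alignments and headers:
--         alignments = ['---'] * len(headers)
--     return headers, rows, alignments
-- ===== Notes on version B (the rewrite author's own statement) =====
-- stated objective: simpler
-- what changed: B replaces A's single stateful in_header-flag loop by a declarative decomposition: split the (rstripped) lines at the first header separator, take the last '|'-line before it as headers, the '|'-lines after it as rows, and alignments from the last separator line; A's dead cell-cleaning code is dropped.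
import Mathlib
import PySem

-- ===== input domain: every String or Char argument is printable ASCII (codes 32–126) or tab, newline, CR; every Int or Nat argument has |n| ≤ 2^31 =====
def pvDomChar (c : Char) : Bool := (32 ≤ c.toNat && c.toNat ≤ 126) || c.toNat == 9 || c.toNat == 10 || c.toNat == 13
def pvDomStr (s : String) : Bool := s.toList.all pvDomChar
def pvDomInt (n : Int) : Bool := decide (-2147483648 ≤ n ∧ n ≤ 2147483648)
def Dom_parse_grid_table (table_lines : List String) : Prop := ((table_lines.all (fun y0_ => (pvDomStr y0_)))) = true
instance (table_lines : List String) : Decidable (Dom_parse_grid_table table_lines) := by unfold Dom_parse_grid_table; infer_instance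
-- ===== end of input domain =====

-- B replaces A's stateful in_header-flag loop by splitting the lines at the first header separator (simpler decomposition, same cost).

-- s.split(sep) for a NONEMPTY literal sep: PySem.Str.split? is none only for sep = "", so getD never fires (exact).
def pySplit (s sep : String) : List String := (PySem.Str.split? s sep).getD []

-- ===== PORT A =====
def parse_alignment (separator_line : String) : List String :=
  let parts := (pySplit separator_line "+").filter (fun p => p != "")
  parts.foldl (fun alignments part =>
    let part := PySem.Str.strip part
    if part == "" then alignments
    else
      let starts_colon := PySem.Str.startswith part ":"
      let ends_colon := PySem.Str.endswith part ":"
      if starts_colon && ends_colon then alignments ++ [":---:"]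
      else if ends_colon then alignments ++ ["---:"]
      else if starts_colon then alignments ++ [":---"]
      else alignments ++ ["---"]) []

def parse_grid_table_step (st : List String × List (List String) × List String × Bool)
    (line : String) : List String × List (List String) × List String × Bool :=
  let headers := st.1
  let rows := st.2.1
  let alignments := st.2.2.1
  let in_header := st.2.2.2
  let line := PySem.Str.rstrip line
  if PySem.Str.isIn "=" line && PySem.Str.startswith line "+" then
    (headers, rows, parse_alignment line, false)
  else if PySem.Str.startswith line "+" && PySem.Str.isIn "-" line then
    (headers, rows, alignments, in_header)
  else if PySem.Str.startswith line "|" then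
    -- A's two intermediate 'cells' assignments are dead (immediately overwritten); the live value is:
    let cells := (pySplit (PySem.Str.stripChars line "|") "|").map (fun c => PySem.Str.strip c)
    if in_header then (cells, rows, alignments, in_header)
    else (headers, rows ++ [cells], alignments, in_header)
  else (headers, rows, alignments, in_header)

def parse_grid_table (table_lines : List String) : List String × List (List String) × List String :=
  let st := table_lines.foldl parse_grid_table_step ([], [], [], true)
  let headers := st.1
  let rows := st.2.1
  let alignments := st.2.2.1
  let alignments := if alignments == [] && headers != [] then List.replicate headers.length "---" else alignments
  (headers, rows, alignments)

-- ===== PORT B =====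
def pgtB_isSep (line : String) : Bool :=
  PySem.Str.startswith line "+" && PySem.Str.isIn "=" line

def pgtB_align (p : String) : String :=
  match PySem.Str.startswith p ":", PySem.Str.endswith p ":" with
  | true, true => ":---:"
  | false, true => "---:"
  | true, false => ":---"
  | false, false => "---"

def pgtB_alignments_of (separator_line : String) : List String :=
  (pySplit separator_line "+").foldl (fun out part =>
    let p := PySem.Str.strip part
    if p == "" then out else out ++ [pgtB_align p]) []

def pgtB_cells (line : String) : List String :=
  (pySplit (PySem.Str.stripChars line "|") "|").map (fun c => PySem.Str.strip c)

def parse_grid_table_alt (table_lines : List String) : List String × List (List String) × List String :=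
  let clean := table_lines.map PySem.Str.rstrip
  let head_zone := (table_lines.map PySem.Str.rstrip).takeWhile (fun l => !pgtB_isSep l)
  let tail := (clean.dropWhile (fun l => !pgtB_isSep l)).tail
  let seps := (table_lines.map PySem.Str.rstrip).filter pgtB_isSep
  let alignments := match seps.getLast? with
    | some s => pgtB_alignments_of s
    | none => []
  let header_lines := head_zone.filter (fun l => PySem.Str.startswith l "|")
  let headers := match header_lines.getLast? with
    | some h => pgtB_cells h
    | none => []
  let rows := (tail.filter (fun l => PySem.Str.startswith l "|")).map pgtB_cells
  let alignments := if alignments == [] && headers != [] then List.replicate headers.length "---" else alignments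
  (headers, rows, alignments)

-- ===== PRECONDITION & SPEC =====
def Spec_parse_grid_table (table_lines : List String) (out : List String × List (List String) × List String) : Prop := out = parse_grid_table_alt table_lines
instance (table_lines : List String) (out : List String × List (List String) × List String) : Decidable (Spec_parse_grid_table table_lines out) := by unfold Spec_parse_grid_table; infer_instance

-- ===== CLAIM (what is proved, stated in full; the proofs are below) =====
def Claim_equal_parse_grid_table : Prop := ∀ (table_lines : List String), Dom_parse_grid_table table_lines → Spec_parse_grid_table table_lines (parse_grid_table table_lines)

-- ===== LEMMAS AND PROOFS =====

-- A's loop body after the initial 'line = line.rstrip()' (proof helper)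
def pgtG : (List String × List (List String) × List String × Bool) → String →
    List String × List (List String) × List String × Bool
  | (headers, rows, alignments, in_header), line =>
    if PySem.Str.isIn "=" line && PySem.Str.startswith line "+" then
      (headers, rows, parse_alignment line, false)
    else if PySem.Str.startswith line "+" && PySem.Str.isIn "-" line then
      (headers, rows, alignments, in_header)
    else if PySem.Str.startswith line "|" then
      (if in_header then (pgtB_cells line, rows, alignments, in_header)
       else (headers, rows ++ [pgtB_cells line], alignments, in_header))
    else (headers, rows, alignments, in_header)

def pgtIsBar (l : String) : Bool := PySem.Str.startswith l "|"

def pgtHdr (zone : List String) (h : List String) : List String :=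
  ((zone.filter pgtIsBar).map pgtB_cells).getLastD h

def pgtAlignRes (al : List String) (ls : List String) : List String :=
  ((ls.filter pgtB_isSep).map parse_alignment).getLastD al

theorem pgt_step_eq : parse_grid_table_step = fun st l => pgtG st (PySem.Str.rstrip l) := by
  funext st l
  rcases st with ⟨h, rs, al, b⟩
  rfl

theorem pgt_plus_not_bar (l : String) (h : PySem.Str.startswith l "+" = true) :
    PySem.Str.startswith l "|" = false := by
  rw [PySem.Str.startswith_eq, PySem.Chars.startswith_iff,
      show ("+" : String).toList = ['+'] from rfl] at h
  rw [PySem.Str.startswith_eq, Bool.eq_false_iff, Ne, PySem.Chars.startswith_iff,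
      show ("|" : String).toList = ['|'] from rfl]
  intro hb
  obtain ⟨t, ht⟩ := h
  obtain ⟨u, hu⟩ := hb
  rw [← ht] at hu
  have : '|' = '+' ∧ u = t := by
    have := hu
    simpa using this
  exact absurd this.1 (by decide)

theorem pgt_sep_not_bar (l : String) (h : pgtB_isSep l = true) : pgtIsBar l = false := by
  unfold pgtB_isSep at h
  exact pgt_plus_not_bar l (Bool.and_eq_true _ _ |>.mp h).1

theorem pgt_strip_empty : PySem.Str.strip "" = "" := by decide

-- evaluation lemmas for one pgtG step
theorem pgtG_sep (h : List String) (rs : List (List String)) (al : List String) (b : Bool)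
    (c : String) (h1 : (PySem.Str.isIn "=" c && PySem.Str.startswith c "+") = true) :
    pgtG (h, rs, al, b) c = (h, rs, parse_alignment c, false) := by
  simp only [pgtG]
  rw [if_pos h1]

theorem pgtG_pm (h : List String) (rs : List (List String)) (al : List String) (b : Bool)
    (c : String) (h1 : (PySem.Str.isIn "=" c && PySem.Str.startswith c "+") = false)
    (h2 : (PySem.Str.startswith c "+" && PySem.Str.isIn "-" c) = true) :
    pgtG (h, rs, al, b) c = (h, rs, al, b) := by
  simp only [pgtG]
  rw [if_neg (by rw [h1]; exact Bool.false_ne_true), if_pos h2]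

theorem pgtG_bar_true (h : List String) (rs : List (List String)) (al : List String)
    (c : String) (h1 : (PySem.Str.isIn "=" c && PySem.Str.startswith c "+") = false)
    (h2 : (PySem.Str.startswith c "+" && PySem.Str.isIn "-" c) = false)
    (h3 : PySem.Str.startswith c "|" = true) :
    pgtG (h, rs, al, true) c = (pgtB_cells c, rs, al, true) := by
  simp only [pgtG]
  rw [if_neg (by rw [h1]; exact Bool.false_ne_true),
      if_neg (by rw [h2]; exact Bool.false_ne_true), if_pos h3]
  simp

theorem pgtG_bar_false (h : List String) (rs : List (List String)) (al : List String)
    (c : String) (h1 : (PySem.Str.isIn "=" c && PySem.Str.startswith c "+") = false)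
    (h2 : (PySem.Str.startswith c "+" && PySem.Str.isIn "-" c) = false)
    (h3 : PySem.Str.startswith c "|" = true) :
    pgtG (h, rs, al, false) c = (h, rs ++ [pgtB_cells c], al, false) := by
  simp only [pgtG]
  rw [if_neg (by rw [h1]; exact Bool.false_ne_true),
      if_neg (by rw [h2]; exact Bool.false_ne_true), if_pos h3,
      if_neg Bool.false_ne_true]

theorem pgtG_other (h : List String) (rs : List (List String)) (al : List String) (b : Bool)
    (c : String) (h1 : (PySem.Str.isIn "=" c && PySem.Str.startswith c "+") = false)
    (h2 : (PySem.Str.startswith c "+" && PySem.Str.isIn "-" c) = false)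
    (h3 : PySem.Str.startswith c "|" = false) :
    pgtG (h, rs, al, b) c = (h, rs, al, b) := by
  simp only [pgtG]
  rw [if_neg (by rw [h1]; exact Bool.false_ne_true),
      if_neg (by rw [h2]; exact Bool.false_ne_true),
      if_neg (by rw [h3]; exact Bool.false_ne_true)]

-- rewriting lemmas for the result descriptors
theorem pgtAlignRes_cons_sep (c : String) (ls : List String) (al : List String)
    (h : pgtB_isSep c = true) :
    pgtAlignRes al (c :: ls) = pgtAlignRes (parse_alignment c) ls := by
  unfold pgtAlignRes
  rw [List.filter_cons_of_pos h, List.map_cons, List.getLastD_cons]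

theorem pgtAlignRes_cons_neg (c : String) (ls : List String) (al : List String)
    (h : pgtB_isSep c = false) :
    pgtAlignRes al (c :: ls) = pgtAlignRes al ls := by
  unfold pgtAlignRes
  rw [List.filter_cons_of_neg (by rw [h]; exact Bool.false_ne_true)]

theorem pgtHdr_cons_bar (c : String) (zone : List String) (hh : List String)
    (h : pgtIsBar c = true) :
    pgtHdr (c :: zone) hh = pgtHdr zone (pgtB_cells c) := by
  unfold pgtHdr
  rw [List.filter_cons_of_pos h, List.map_cons, List.getLastD_cons]

theorem pgtHdr_cons_neg (c : String) (zone : List String) (hh : List String)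
    (h : pgtIsBar c = false) :
    pgtHdr (c :: zone) hh = pgtHdr zone hh := by
  unfold pgtHdr
  rw [List.filter_cons_of_neg (by rw [h]; exact Bool.false_ne_true)]

theorem pgtBars_cons_neg (c : String) (ls : List String) (h : pgtIsBar c = false) :
    (c :: ls).filter pgtIsBar = ls.filter pgtIsBar := by
  rw [List.filter_cons_of_neg (by rw [h]; exact Bool.false_ne_true)]

-- A's and B's alignment loop bodies are the same function
theorem pgt_align_step_eq :
    (fun (alignments : List String) (part : String) =>
      let part := PySem.Str.strip part
      if part == "" then alignments
      else
        let starts_colon := PySem.Str.startswith part ":"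
        let ends_colon := PySem.Str.endswith part ":"
        if starts_colon && ends_colon then alignments ++ [":---:"]
        else if ends_colon then alignments ++ ["---:"]
        else if starts_colon then alignments ++ [":---"]
        else alignments ++ ["---"])
    = (fun (out : List String) (part : String) =>
        let p := PySem.Str.strip part
        if p == "" then out else out ++ [pgtB_align p]) := by
  funext acc p
  show (if (PySem.Str.strip p == "") = true then acc
        else if (PySem.Str.startswith (PySem.Str.strip p) ":" && PySem.Str.endswith (PySem.Str.strip p) ":") = true then acc ++ [":---:"]
        else if (PySem.Str.endswith (PySem.Str.strip p) ":") = true then acc ++ ["---:"]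
        else if (PySem.Str.startswith (PySem.Str.strip p) ":") = true then acc ++ [":---"]
        else acc ++ ["---"])
      = (if (PySem.Str.strip p == "") = true then acc else acc ++ [pgtB_align (PySem.Str.strip p)])
  by_cases h : (PySem.Str.strip p == "") = true
  · rw [if_pos h, if_pos h]
  · rw [if_neg h, if_neg h]
    unfold pgtB_align
    cases h1 : PySem.Str.startswith (PySem.Str.strip p) ":" <;>
      cases h2 : PySem.Str.endswith (PySem.Str.strip p) ":" <;>
      rfl

-- B's alignment fold skips empty parts, so the pre-filter in A is redundant
theorem pgt_Bfold_filter (parts : List String) :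
    ∀ (acc : List String),
    (parts.filter (fun p => p != "")).foldl (fun (out : List String) (part : String) =>
        let p := PySem.Str.strip part
        if p == "" then out else out ++ [pgtB_align p]) acc
    = parts.foldl (fun (out : List String) (part : String) =>
        let p := PySem.Str.strip part
        if p == "" then out else out ++ [pgtB_align p]) acc := by
  induction parts with
  | nil => intro acc; rfl
  | cons p ps ih =>
    intro acc
    by_cases hp : p = ""
    · subst hp
      have hfc : ("" :: ps).filter (fun p => p != "") = ps.filter (fun p => p != "") := by simp
      rw [hfc, List.foldl_cons]
      rw [show (let q := PySem.Str.strip ""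
                if q == "" then acc else acc ++ [pgtB_align q]) = acc from by
        show (if (PySem.Str.strip "" == "") = true then acc else _) = acc
        rw [if_pos (by rw [pgt_strip_empty]; rfl)]]
      exact ih acc
    · have hfc : (p :: ps).filter (fun p => p != "") = p :: ps.filter (fun p => p != "") := by
        simp [hp]
      rw [hfc, List.foldl_cons, List.foldl_cons]
      exact ih _

theorem pgt_align_eq (s : String) : parse_alignment s = pgtB_alignments_of s := by
  unfold parse_alignment pgtB_alignments_of
  rw [pgt_align_step_eq]
  exact pgt_Bfold_filter (pySplit s "+") []

theorem pgt_dropWhile_head_false {α : Type} (p : α → Bool) (l : List α) (x : α) (xs : List α)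
    (h : l.dropWhile p = x :: xs) : p x = false := by
  induction l with
  | nil => simp at h
  | cons c cs ih =>
    by_cases hc : p c
    · rw [List.dropWhile_cons_of_pos hc] at h; exact ih h
    · rw [List.dropWhile_cons_of_neg hc] at h
      cases h; simpa using hc

-- the loop once in_header is False
theorem pgt_fold_false (ls : List String) :
    ∀ (h : List String) (rs : List (List String)) (al : List String),
    ls.foldl pgtG (h, rs, al, false) =
      (h, rs ++ (ls.filter pgtIsBar).map pgtB_cells, pgtAlignRes al ls, false) := by
  induction ls with
  | nil => intro h rs al; simp [pgtAlignRes]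
  | cons c cs ih =>
    intro h rs al
    rw [List.foldl_cons]
    by_cases h1 : (PySem.Str.isIn "=" c && PySem.Str.startswith c "+") = true
    · have hsep : pgtB_isSep c = true := by unfold pgtB_isSep; rw [Bool.and_comm]; exact h1
      have hbar := pgt_sep_not_bar c hsep
      rw [pgtG_sep _ _ _ _ _ h1, ih, pgtAlignRes_cons_sep _ _ _ hsep, pgtBars_cons_neg _ _ hbar]
    · have h1' := Bool.eq_false_iff.mpr h1
      have hsep : pgtB_isSep c = false := by unfold pgtB_isSep; rw [Bool.and_comm]; exact h1'
      by_cases h2 : (PySem.Str.startswith c "+" && PySem.Str.isIn "-" c) = true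
      · have hbar : pgtIsBar c = false :=
          pgt_plus_not_bar c (Bool.and_eq_true _ _ |>.mp h2).1
        rw [pgtG_pm _ _ _ _ _ h1' h2, ih, pgtAlignRes_cons_neg _ _ _ hsep,
            pgtBars_cons_neg _ _ hbar]
      · have h2' := Bool.eq_false_iff.mpr h2
        by_cases h3 : PySem.Str.startswith c "|" = true
        · rw [pgtG_bar_false _ _ _ _ h1' h2' h3, ih, pgtAlignRes_cons_neg _ _ _ hsep,
              List.filter_cons_of_pos (show pgtIsBar c = true from h3), List.map_cons]
          simp
        · have h3' := Bool.eq_false_iff.mpr h3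
          rw [pgtG_other _ _ _ _ _ h1' h2' h3', ih, pgtAlignRes_cons_neg _ _ _ hsep,
              pgtBars_cons_neg _ _ h3']

-- the loop from the initial in_header = True state
theorem pgt_fold_true (ls : List String) :
    ∀ (h : List String) (rs : List (List String)) (al : List String),
    ls.foldl pgtG (h, rs, al, true) =
      match ls.dropWhile (fun l => !pgtB_isSep l) with
      | [] => (pgtHdr ls h, rs, al, true)
      | s :: post =>
          (pgtHdr (ls.takeWhile (fun l => !pgtB_isSep l)) h,
           rs ++ (post.filter pgtIsBar).map pgtB_cells,
           pgtAlignRes (parse_alignment s) post, false) := by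
  induction ls with
  | nil => intro h rs al; rfl
  | cons c cs ih =>
    intro h rs al
    rw [List.foldl_cons]
    by_cases h1 : (PySem.Str.isIn "=" c && PySem.Str.startswith c "+") = true
    · have hsep : pgtB_isSep c = true := by unfold pgtB_isSep; rw [Bool.and_comm]; exact h1
      rw [pgtG_sep _ _ _ _ _ h1, pgt_fold_false,
          List.dropWhile_cons_of_neg (by rw [hsep]; simp),
          List.takeWhile_cons_of_neg (by rw [hsep]; simp)]
      dsimp only
      rfl
    · have h1' := Bool.eq_false_iff.mpr h1
      have hsep : pgtB_isSep c = false := by unfold pgtB_isSep; rw [Bool.and_comm]; exact h1'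
      rw [List.dropWhile_cons_of_pos (by rw [hsep]; simp),
          List.takeWhile_cons_of_pos (by rw [hsep]; simp)]
      by_cases h2 : (PySem.Str.startswith c "+" && PySem.Str.isIn "-" c) = true
      · have hbar : pgtIsBar c = false :=
          pgt_plus_not_bar c (Bool.and_eq_true _ _ |>.mp h2).1
        rw [pgtG_pm _ _ _ _ _ h1' h2, ih]
        cases hd : cs.dropWhile (fun l => !pgtB_isSep l) with
        | nil => dsimp only; rw [pgtHdr_cons_neg _ _ _ hbar]
        | cons s post => dsimp only; rw [pgtHdr_cons_neg _ _ _ hbar]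
      · have h2' := Bool.eq_false_iff.mpr h2
        by_cases h3 : PySem.Str.startswith c "|" = true
        · rw [pgtG_bar_true _ _ _ _ h1' h2' h3, ih]
          cases hd : cs.dropWhile (fun l => !pgtB_isSep l) with
          | nil => dsimp only; rw [pgtHdr_cons_bar _ _ _ (show pgtIsBar c = true from h3)]
          | cons s post => dsimp only; rw [pgtHdr_cons_bar _ _ _ (show pgtIsBar c = true from h3)]
        · have h3' := Bool.eq_false_iff.mpr h3
          rw [pgtG_other _ _ _ _ _ h1' h2' h3', ih]
          cases hd : cs.dropWhile (fun l => !pgtB_isSep l) with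
          | nil => dsimp only; rw [pgtHdr_cons_neg _ _ _ h3']
          | cons s post => dsimp only; rw [pgtHdr_cons_neg _ _ _ h3']

-- ===== VERDICT (by name: the statement is the Claim_ definition above) =====
set_option maxHeartbeats 1000000 in
theorem parse_grid_table_spec : Claim_equal_parse_grid_table := by
  intro table_lines _
  unfold Spec_parse_grid_table parse_grid_table parse_grid_table_alt
  rw [pgt_step_eq, ← List.foldl_map, pgt_fold_true]
  cases hd : (table_lines.map PySem.Str.rstrip).dropWhile (fun l => !pgtB_isSep l) with
  | nil =>
    dsimp only
    have htw : (table_lines.map PySem.Str.rstrip).takeWhile (fun l => !pgtB_isSep l)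
        = table_lines.map PySem.Str.rstrip := by
      conv_rhs => rw [← List.takeWhile_append_dropWhile
        (p := fun l => !pgtB_isSep l) (l := table_lines.map PySem.Str.rstrip)]
      rw [hd, List.append_nil]
    have hfil : (table_lines.map PySem.Str.rstrip).filter pgtB_isSep = [] := by
      rw [List.filter_eq_nil_iff]
      intro a ha
      rw [← htw] at ha
      have := List.mem_takeWhile_imp ha
      simp at this
      simp [this]
    rw [htw, hfil, hd]
    simp only [pgtHdr]
    rw [show pgtIsBar = (fun l => PySem.Str.startswith l "|") from rfl]
    cases hb : ((table_lines.map PySem.Str.rstrip).filter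
        (fun l => PySem.Str.startswith l "|")).getLast? <;>
      simp only [List.getLastD_eq_getLast?, List.getLast?_map, hb] <;> simp
  | cons s post =>
    dsimp only
    have hsep : pgtB_isSep s = true := by
      have := pgt_dropWhile_head_false (fun l => !pgtB_isSep l)
        (table_lines.map PySem.Str.rstrip) s post hd
      simpa using this
    have hsplit : table_lines.map PySem.Str.rstrip
        = (table_lines.map PySem.Str.rstrip).takeWhile (fun l => !pgtB_isSep l) ++ s :: post := by
      conv_lhs => rw [← List.takeWhile_append_dropWhile
        (p := fun l => !pgtB_isSep l) (l := table_lines.map PySem.Str.rstrip)]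
      rw [hd]
    have htwfil : ((table_lines.map PySem.Str.rstrip).takeWhile
        (fun l => !pgtB_isSep l)).filter pgtB_isSep = [] := by
      rw [List.filter_eq_nil_iff]
      intro a ha
      have := List.mem_takeWhile_imp ha
      simp at this
      simp [this]
    have hfil : (table_lines.map PySem.Str.rstrip).filter pgtB_isSep
        = s :: post.filter pgtB_isSep := by
      conv_lhs => rw [hsplit]
      rw [List.filter_append, htwfil, List.nil_append, List.filter_cons_of_pos hsep]
    rw [hfil, hd]
    simp only [pgtHdr, pgtAlignRes]
    rw [show pgtIsBar = (fun l => PySem.Str.startswith l "|") from rfl]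
    cases hb : (((table_lines.map PySem.Str.rstrip).takeWhile (fun l => !pgtB_isSep l)).filter
        (fun l => PySem.Str.startswith l "|")).getLast? <;>
      cases hl : (post.filter pgtB_isSep).getLast? <;>
      simp only [List.getLast?_cons, List.getLastD_eq_getLast?, List.getLast?_map,
        List.tail_cons, List.nil_append, hb, hl, pgt_align_eq] <;> simp [pgt_align_eq]
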